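-- pv_equiv track=rewrite | github.com/fariedgunawan/TBA | parser.py | isSubjek
-- ===== SOURCE A (Python) =====
-- def isSubjek(word: str) -> bool:
--     # Subjek = {'aku', 'anda', 'kamu', 'dia', 'saya'}
--     currState = 0
--     for letter in word:
--         match currState:
--             case -1: break
--             case 0:
--                 if letter == 'a': currState = 1
--                 elif letter == 'k': currState = 2
--                 elif letter == 'd': currState = 3
--                 elif letter == 's': currState = 4
--                 else: currState = -1
--             case 1:
--                 if letter == 'n': currState = 5
--                 elif letter == 'k': currState = 6
--                 else: currState = -1
--             case 2: currState = 7 if letter == 'a' else -1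
--             case 7: currState = 11 if letter == 'm' else -1
--             case 11: currState = 10 if letter == 'u' else -1 #final state
--             case 10: currState = 10 if letter == ' ' else -1 #final state
--             case 3: currState = 8 if letter == 'i' else -1
--             case 8: currState = 12 if letter == 'a' else -1 #final state
--             case 12: currState = 12 if letter == ' ' else -1 #final state
--             case 4: currState = 9 if letter == 'a' else -1
--             case 9: currState = 13 if letter == 'y' else -1
--             case 13: currState = 12 if letter == 'a' else -1 # FINAL STATE
--             case 5: currState = 8 if letter == 'd' else -1
--             case 8: currState = 12 if letter == 'a' else -1 #FINAL STATE
--             case 6: currState = 10 if letter == 'u' else -1 #FINAL STATE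
--     return currState == 10 or currState == 12
-- ===== SOURCE B (Python) =====
-- def isSubjek(word: str) -> bool:
--     # strip ONLY trailing ASCII spaces, then one set lookup
--     return word.rstrip(' ') in {'aku', 'anda', 'kamu', 'dia', 'saya'}
-- ===== Notes on version B (the rewrite author's own statement) =====
-- stated objective: simpler
-- what changed: Replaced the hand-coded character-by-character DFA with a single strip of trailing spaces followed by a membership test in the fixed five-word set.
import Mathlib
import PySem

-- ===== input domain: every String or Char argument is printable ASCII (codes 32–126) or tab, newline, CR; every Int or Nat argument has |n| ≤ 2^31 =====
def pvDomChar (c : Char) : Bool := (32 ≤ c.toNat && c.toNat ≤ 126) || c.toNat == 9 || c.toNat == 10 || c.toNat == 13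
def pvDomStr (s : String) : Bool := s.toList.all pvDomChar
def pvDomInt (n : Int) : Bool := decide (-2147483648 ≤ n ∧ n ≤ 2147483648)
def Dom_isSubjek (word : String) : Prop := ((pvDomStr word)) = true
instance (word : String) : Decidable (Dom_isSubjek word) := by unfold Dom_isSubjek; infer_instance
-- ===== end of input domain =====

-- B replaces A's hand-coded character DFA with a trailing-space strip plus one membership test (objective: simpler).


-- ===== PORT A =====
-- one transition of A's match statement (cases in source order)
def subjekStep (s : Int) (c : Char) : Int :=
  if s = 0 then
    (if c = 'a' then 1 else if c = 'k' then 2 else if c = 'd' then 3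
     else if c = 's' then 4 else -1)
  else if s = 1 then (if c = 'n' then 5 else if c = 'k' then 6 else -1)
  else if s = 2 then (if c = 'a' then 7 else -1)
  else if s = 7 then (if c = 'm' then 11 else -1)
  else if s = 11 then (if c = 'u' then 10 else -1)
  else if s = 10 then (if c = ' ' then 10 else -1)
  else if s = 3 then (if c = 'i' then 8 else -1)
  else if s = 8 then (if c = 'a' then 12 else -1)
  else if s = 12 then (if c = ' ' then 12 else -1)
  else if s = 4 then (if c = 'a' then 9 else -1)
  else if s = 9 then (if c = 'y' then 13 else -1)
  else if s = 13 then (if c = 'a' then 12 else -1)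
  else if s = 5 then (if c = 'd' then 8 else -1)
  else if s = 6 then (if c = 'u' then 10 else -1)
  else s  -- a match with no matching case leaves the state unchanged

-- the for-loop: 'case -1: break' exits early returning the current state
def subjekRun (s : Int) (l : List Char) : Int :=
  match l with
  | [] => s
  | c :: r => if s = -1 then s else subjekRun (subjekStep s c) r

def isSubjek (word : String) : Bool :=
  let f := subjekRun 0 word.toList
  decide (f = 10) || decide (f = 12)

-- ===== PORT B =====
-- hand-port of str.rstrip(' ') on the char list (PySem has no chars-argument rstrip);
-- exact: removes exactly the maximal run of trailing ' ' characters
def rstripSpace : List Char → List Char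
  | [] => []
  | c :: r =>
      let t := rstripSpace r
      if c = ' ' ∧ t = [] then [] else c :: t

def isSubjek_alt (word : String) : Bool :=
  let w := rstripSpace word.toList
  decide (w = "aku".toList) || decide (w = "anda".toList) || decide (w = "kamu".toList)
    || decide (w = "dia".toList) || decide (w = "saya".toList)

-- ===== PRECONDITION & SPEC =====
def Spec_isSubjek (word : String) (out : Bool) : Prop := out = isSubjek_alt word
instance (word : String) (out : Bool) : Decidable (Spec_isSubjek word out) := by unfold Spec_isSubjek; infer_instance

-- ===== CLAIM (what is proved, stated in full; the proofs are below) =====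
def Claim_equal_isSubjek : Prop := ∀ (word : String), Dom_isSubjek word → Spec_isSubjek word (isSubjek word)

-- ===== LEMMAS AND PROOFS =====

-- acceptance from state s on remaining input l
def subjekAcc (s : Int) (l : List Char) : Bool :=
  decide (subjekRun s l = 10) || decide (subjekRun s l = 12)

theorem subjekRun_dead (l : List Char) : subjekRun (-1) l = -1 := by
  cases l <;> simp [subjekRun]

theorem acc10 (l : List Char) : subjekAcc 10 l = decide (rstripSpace l = []) := by
  induction l with
  | nil => simp [subjekAcc, subjekRun, rstripSpace]
  | cons c r ih =>
    by_cases hc : c = ' ' <;>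
      simp [subjekAcc, subjekRun, subjekStep, rstripSpace, hc, ← ih, subjekRun_dead]

theorem acc12 (l : List Char) : subjekAcc 12 l = decide (rstripSpace l = []) := by
  induction l with
  | nil => simp [subjekAcc, subjekRun, rstripSpace]
  | cons c r ih =>
    by_cases hc : c = ' ' <;>
      simp [subjekAcc, subjekRun, subjekStep, rstripSpace, hc, ← ih, subjekRun_dead]

theorem acc11 (l : List Char) : subjekAcc 11 l = decide (rstripSpace l = ['u']) := by
  cases l with
  | nil => simp [subjekAcc, subjekRun, rstripSpace]
  | cons c r =>
    by_cases hc : c = 'u' <;>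
      simp [subjekAcc, subjekRun, subjekStep, rstripSpace, hc, subjekRun_dead, ← acc10,
        subjekAcc] <;> (split_ifs <;> simp_all [subjekRun_dead])

theorem acc13 (l : List Char) : subjekAcc 13 l = decide (rstripSpace l = ['a']) := by
  cases l with
  | nil => simp [subjekAcc, subjekRun, rstripSpace]
  | cons c r =>
    by_cases hc : c = 'a' <;>
      simp [subjekAcc, subjekRun, subjekStep, rstripSpace, hc, subjekRun_dead, ← acc12,
        subjekAcc] <;> (split_ifs <;> simp_all [subjekRun_dead])

theorem acc8 (l : List Char) : subjekAcc 8 l = decide (rstripSpace l = ['a']) := by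
  cases l with
  | nil => simp [subjekAcc, subjekRun, rstripSpace]
  | cons c r =>
    by_cases hc : c = 'a' <;>
      simp [subjekAcc, subjekRun, subjekStep, rstripSpace, hc, subjekRun_dead, ← acc12,
        subjekAcc] <;> (split_ifs <;> simp_all [subjekRun_dead])

theorem acc6 (l : List Char) : subjekAcc 6 l = decide (rstripSpace l = ['u']) := by
  cases l with
  | nil => simp [subjekAcc, subjekRun, rstripSpace]
  | cons c r =>
    by_cases hc : c = 'u' <;>
      simp [subjekAcc, subjekRun, subjekStep, rstripSpace, hc, subjekRun_dead, ← acc10,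
        subjekAcc] <;> (split_ifs <;> simp_all [subjekRun_dead])

theorem acc7 (l : List Char) : subjekAcc 7 l = decide (rstripSpace l = ['m','u']) := by
  cases l with
  | nil => simp [subjekAcc, subjekRun, rstripSpace]
  | cons c r =>
    by_cases hc : c = 'm' <;>
      simp [subjekAcc, subjekRun, subjekStep, rstripSpace, hc, subjekRun_dead, ← acc11,
        subjekAcc] <;> (split_ifs <;> simp_all [subjekRun_dead])

theorem acc9 (l : List Char) : subjekAcc 9 l = decide (rstripSpace l = ['y','a']) := by
  cases l with
  | nil => simp [subjekAcc, subjekRun, rstripSpace]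
  | cons c r =>
    by_cases hc : c = 'y' <;>
      simp [subjekAcc, subjekRun, subjekStep, rstripSpace, hc, subjekRun_dead, ← acc13,
        subjekAcc] <;> (split_ifs <;> simp_all [subjekRun_dead])

theorem acc5 (l : List Char) : subjekAcc 5 l = decide (rstripSpace l = ['d','a']) := by
  cases l with
  | nil => simp [subjekAcc, subjekRun, rstripSpace]
  | cons c r =>
    by_cases hc : c = 'd' <;>
      simp [subjekAcc, subjekRun, subjekStep, rstripSpace, hc, subjekRun_dead, ← acc8,
        subjekAcc] <;> (split_ifs <;> simp_all [subjekRun_dead])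

theorem acc2 (l : List Char) : subjekAcc 2 l = decide (rstripSpace l = ['a','m','u']) := by
  cases l with
  | nil => simp [subjekAcc, subjekRun, rstripSpace]
  | cons c r =>
    by_cases hc : c = 'a' <;>
      simp [subjekAcc, subjekRun, subjekStep, rstripSpace, hc, subjekRun_dead, ← acc7,
        subjekAcc] <;> (split_ifs <;> simp_all [subjekRun_dead])

theorem acc3 (l : List Char) : subjekAcc 3 l = decide (rstripSpace l = ['i','a']) := by
  cases l with
  | nil => simp [subjekAcc, subjekRun, rstripSpace]
  | cons c r =>
    by_cases hc : c = 'i' <;>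
      simp [subjekAcc, subjekRun, subjekStep, rstripSpace, hc, subjekRun_dead, ← acc8,
        subjekAcc] <;> (split_ifs <;> simp_all [subjekRun_dead])

theorem acc4 (l : List Char) : subjekAcc 4 l = decide (rstripSpace l = ['a','y','a']) := by
  cases l with
  | nil => simp [subjekAcc, subjekRun, rstripSpace]
  | cons c r =>
    by_cases hc : c = 'a' <;>
      simp [subjekAcc, subjekRun, subjekStep, rstripSpace, hc, subjekRun_dead, ← acc9,
        subjekAcc] <;> (split_ifs <;> simp_all [subjekRun_dead])

theorem acc1 (l : List Char) :
    subjekAcc 1 l = (decide (rstripSpace l = ['n','d','a']) || decide (rstripSpace l = ['k','u'])) := by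
  cases l with
  | nil => simp [subjekAcc, subjekRun, rstripSpace]
  | cons c r =>
    by_cases hn : c = 'n'
    · simp [subjekAcc, subjekRun, subjekStep, rstripSpace, hn, ← acc5, subjekAcc]
    · by_cases hk : c = 'k' <;>
        simp [subjekAcc, subjekRun, subjekStep, rstripSpace, hn, hk, subjekRun_dead, ← acc6,
          subjekAcc] <;> (split_ifs <;> simp_all [subjekRun_dead])

theorem acc0 (l : List Char) :
    subjekAcc 0 l =
      (decide (rstripSpace l = "aku".toList) || decide (rstripSpace l = "anda".toList)
        || decide (rstripSpace l = "kamu".toList) || decide (rstripSpace l = "dia".toList)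
        || decide (rstripSpace l = "saya".toList)) := by
  cases l with
  | nil => simp [subjekAcc, subjekRun, rstripSpace]
  | cons c r =>
    by_cases ha : c = 'a'
    · have h1 := acc1 r
      simp only [subjekAcc] at h1 ⊢
      subst ha
      simp only [subjekRun, subjekStep, rstripSpace,
        show ((0:Int) = -1) = False by simp, if_false, if_true]
      rw [h1]
      simp only [show (('a':Char) = ' ') = False by decide, false_and, if_false,
        show "aku".toList = ['a','k','u'] from rfl,
      show "anda".toList = ['a','n','d','a'] from rfl,
      show "kamu".toList = ['k','a','m','u'] from rfl,
      show "dia".toList = ['d','i','a'] from rfl,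
      show "saya".toList = ['s','a','y','a'] from rfl, List.cons.injEq, true_and, false_and,
      decide_false, Bool.or_false, Bool.false_or, show (('a':Char) = 'k') = False by decide, show (('a':Char) = 'd') = False by decide, show (('a':Char) = 's') = False by decide]
      exact Bool.or_comm _ _
    · by_cases hk : c = 'k'
      · have h2 := acc2 r
        simp only [subjekAcc] at h2 ⊢
        subst hk
        simp only [subjekRun, subjekStep, rstripSpace,
          show ((0:Int) = -1) = False by simp, show (('k':Char) = 'a') = False by decide, if_false, if_true]
        rw [h2]
        simp only [show (('k':Char) = ' ') = False by decide, false_and, if_false,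
          show "aku".toList = ['a','k','u'] from rfl,
      show "anda".toList = ['a','n','d','a'] from rfl,
      show "kamu".toList = ['k','a','m','u'] from rfl,
      show "dia".toList = ['d','i','a'] from rfl,
      show "saya".toList = ['s','a','y','a'] from rfl, List.cons.injEq, true_and, false_and,
      decide_false, Bool.or_false, Bool.false_or, show (('k':Char) = 'd') = False by decide, show (('k':Char) = 's') = False by decide, show (('k':Char) = 'a') = False by decide]
      · by_cases hd : c = 'd'
        · have h3 := acc3 r
          simp only [subjekAcc] at h3 ⊢
          subst hd
          simp only [subjekRun, subjekStep, rstripSpace,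
            show ((0:Int) = -1) = False by simp, show (('d':Char) = 'a') = False by decide, show (('d':Char) = 'k') = False by decide, if_false, if_true]
          rw [h3]
          simp only [show (('d':Char) = ' ') = False by decide, false_and, if_false,
            show "aku".toList = ['a','k','u'] from rfl,
      show "anda".toList = ['a','n','d','a'] from rfl,
      show "kamu".toList = ['k','a','m','u'] from rfl,
      show "dia".toList = ['d','i','a'] from rfl,
      show "saya".toList = ['s','a','y','a'] from rfl, List.cons.injEq, true_and, false_and,
      decide_false, Bool.or_false, Bool.false_or, show (('d':Char) = 's') = False by decide, show (('d':Char) = 'a') = False by decide, show (('d':Char) = 'k') = False by decide]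
        · by_cases hs : c = 's'
          · have h4 := acc4 r
            simp only [subjekAcc] at h4 ⊢
            subst hs
            simp only [subjekRun, subjekStep, rstripSpace,
              show ((0:Int) = -1) = False by simp, show (('s':Char) = 'a') = False by decide, show (('s':Char) = 'k') = False by decide,
              show (('s':Char) = 'd') = False by decide, if_false, if_true]
            rw [h4]
            simp only [show (('s':Char) = ' ') = False by decide, false_and, if_false,
              show "aku".toList = ['a','k','u'] from rfl,
      show "anda".toList = ['a','n','d','a'] from rfl,
      show "kamu".toList = ['k','a','m','u'] from rfl,
      show "dia".toList = ['d','i','a'] from rfl,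
      show "saya".toList = ['s','a','y','a'] from rfl, List.cons.injEq, true_and, false_and,
      decide_false, Bool.or_false, Bool.false_or, show (('s':Char) = 'a') = False by decide,
      show (('s':Char) = 'k') = False by decide, show (('s':Char) = 'd') = False by decide]
          · have hstep : subjekStep 0 c = -1 := by
              simp [subjekStep, ha, hk, hd, hs]
            have hl : (decide (subjekRun 0 (c :: r) = 10) || decide (subjekRun 0 (c :: r) = 12)) = false := by
              simp [subjekRun, hstep, subjekRun_dead]
            simp only [subjekAcc]
            rw [hl]
            simp only [rstripSpace]
            split_ifs with h
            · decide
            · simp only [show "aku".toList = ['a','k','u'] from rfl,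
                show "anda".toList = ['a','n','d','a'] from rfl,
                show "kamu".toList = ['k','a','m','u'] from rfl,
                show "dia".toList = ['d','i','a'] from rfl,
                show "saya".toList = ['s','a','y','a'] from rfl,
                List.cons.injEq, ha, hk, hd, hs, false_and, decide_false, Bool.or_self]

-- ===== VERDICT (by name: the statement is the Claim_ definition above) =====
theorem isSubjek_spec : Claim_equal_isSubjek := by
  intro word _
  unfold Spec_isSubjek isSubjek isSubjek_alt
  have h := acc0 word.toList
  simp only [subjekAcc] at h
  simpa [Bool.or_assoc] using h
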